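-- pv_equiv track=rewrite | github.com/aadelb/loom | src/loom/tools/composition_optimizer.py | _match_goal_pattern
-- ===== SOURCE A (Python) =====
-- GOAL_PATTERNS: dict[str, list[str]] = {
--     "academic": ["research_search", "research_deep", "research_markdown", "research_llm_extract"],
--     "technical": ["research_github", "research_search", "research_fetch", "research_llm_classify"],
--     "comprehensive": ["research_deep", "research_spider", "research_markdown", "research_llm_summarize"],
--     "fast": ["research_search", "research_llm_classify"],
--     "cost_efficient": ["research_search", "research_fetch", "research_llm_classify"],
--     "multilingual": ["research_search", "research_fetch", "research_markdown", "research_llm_translate"],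
-- }
--
-- def _extract_goal_keywords(goal: str) -> list[str]:
--     """Extract keywords from goal to match patterns."""
--     return goal.lower().split()
--
-- def _match_goal_pattern(goal: str) -> list[str]:
--     """Find best matching goal pattern."""
--     keywords = _extract_goal_keywords(goal)
--     scores: dict[str, int] = {}
--
--     for pattern_name, _tools in GOAL_PATTERNS.items():
--         pattern_keywords = pattern_name.split("_")
--         score = sum(1 for kw in keywords if kw in pattern_keywords)
--         if score > 0:
--             scores[pattern_name] = score
--
--     if not scores:
--         return GOAL_PATTERNS["comprehensive"]
--
--     best_pattern = max(scores.keys(), key=lambda x: scores[x])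
--     return GOAL_PATTERNS[best_pattern]
-- ===== SOURCE B (Python) =====
-- GOAL_PATTERNS: dict[str, list[str]] = {
--     "academic": ["research_search", "research_deep", "research_markdown", "research_llm_extract"],
--     "technical": ["research_github", "research_search", "research_fetch", "research_llm_classify"],
--     "comprehensive": ["research_deep", "research_spider", "research_markdown", "research_llm_summarize"],
--     "fast": ["research_search", "research_llm_classify"],
--     "cost_efficient": ["research_search", "research_fetch", "research_llm_classify"],
--     "multilingual": ["research_search", "research_fetch", "research_markdown", "research_llm_translate"],
-- }
--
-- # Inverted index built once: each word of a pattern name points back to that pattern.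
-- WORD_TO_PATTERN: dict[str, str] = {
--     word: name for name in GOAL_PATTERNS for word in name.split("_")
-- }
--
-- def _match_goal_pattern(goal: str) -> list[str]:
--     """Find best matching goal pattern (single pass over the goal's words)."""
--     counts: dict[str, int] = {}
--     for kw in goal.lower().split():
--         pattern = WORD_TO_PATTERN.get(kw)
--         if pattern is not None:
--             counts[pattern] = counts.get(pattern, 0) + 1
--     if not counts:
--         return GOAL_PATTERNS["comprehensive"]
--     best = max(GOAL_PATTERNS, key=lambda p: counts.get(p, 0))
--     return GOAL_PATTERNS[best]
-- ===== Notes on version B (the rewrite author's own statement) =====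
-- stated objective: alternative
-- what changed: Instead of scanning the keyword list once per pattern and building a score dict, B builds an inverted word-to-pattern index once and makes a single counting pass over the goal's words, then picks the first maximal pattern in GOAL_PATTERNS order (falling back to 'comprehensive' when nothing matched).
import Mathlib
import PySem

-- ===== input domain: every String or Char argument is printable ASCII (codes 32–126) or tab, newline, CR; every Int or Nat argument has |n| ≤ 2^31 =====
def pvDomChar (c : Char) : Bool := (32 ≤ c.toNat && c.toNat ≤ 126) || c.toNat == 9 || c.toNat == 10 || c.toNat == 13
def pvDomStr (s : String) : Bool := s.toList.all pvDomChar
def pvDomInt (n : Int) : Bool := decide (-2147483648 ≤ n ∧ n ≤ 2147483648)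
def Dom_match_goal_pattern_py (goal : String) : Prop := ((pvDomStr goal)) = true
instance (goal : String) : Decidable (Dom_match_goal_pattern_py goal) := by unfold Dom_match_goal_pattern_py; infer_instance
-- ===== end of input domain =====

-- B replaces A's per-pattern scan of the keyword list by an inverted word→pattern index built once
-- and a single counting pass over the goal's words (objective: alternative decomposition, same result).

-- ===== PORT A =====
def GOAL_PATTERNS : PySem.Dict String (List String) :=
  PySem.Dict.ofList
    [ ("academic", ["research_search", "research_deep", "research_markdown", "research_llm_extract"])
    , ("technical", ["research_github", "research_search", "research_fetch", "research_llm_classify"])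
    , ("comprehensive", ["research_deep", "research_spider", "research_markdown", "research_llm_summarize"])
    , ("fast", ["research_search", "research_llm_classify"])
    , ("cost_efficient", ["research_search", "research_fetch", "research_llm_classify"])
    , ("multilingual", ["research_search", "research_fetch", "research_markdown", "research_llm_translate"]) ]

def extract_goal_keywords (goal : String) : List String :=
  PySem.Str.split₀ (PySem.Str.lower goal)

-- name.split("_"): the separator "_" is nonempty, so PySem.Str.split? is always `some`; `.getD []` is exact.
-- GOAL_PATTERNS[k] is ported as `.getD k []`: both looked-up keys ("comprehensive", best) are always
-- present, so no KeyError is reachable and the default is never used.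
def match_goal_pattern_py (goal : String) : List String :=
  let keywords := extract_goal_keywords goal
  let scores : PySem.Dict String Int :=
    GOAL_PATTERNS.items.foldl
      (fun sc pt =>
        let pattern_keywords := (PySem.Str.split? pt.1 "_").getD []
        let score : Int := keywords.foldl (fun s kw => if pattern_keywords.contains kw then s + 1 else s) 0
        if score > 0 then sc.insert pt.1 score else sc)
      PySem.Dict.empty
  if scores.items = [] then GOAL_PATTERNS.getD "comprehensive" []
  else
    match PySem.List.max? scores.keys (fun x => scores.getD x 0) with
    | some best => GOAL_PATTERNS.getD best []
    | none => []  -- unreachable: scores is nonempty in this branch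

-- ===== PORT B =====
-- inverted index: {word: name for name in GOAL_PATTERNS for word in name.split("_")}
def WORD_TO_PATTERN : PySem.Dict String String :=
  GOAL_PATTERNS.items.foldl
    (fun d pt => ((PySem.Str.split? pt.1 "_").getD []).foldl (fun d w => d.insert w pt.1) d)
    PySem.Dict.empty

-- loop body of Source B: pattern = WORD_TO_PATTERN.get(kw); if pattern is not None: counts[pattern] = counts.get(pattern, 0) + 1
def bstep (c : PySem.Dict String Int) (kw : String) : PySem.Dict String Int :=
  match WORD_TO_PATTERN.get? kw with
  | some p => c.insert p (c.getD p 0 + 1)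
  | none => c

def match_goal_pattern_py_alt (goal : String) : List String :=
  let counts : PySem.Dict String Int :=
    (PySem.Str.split₀ (PySem.Str.lower goal)).foldl bstep PySem.Dict.empty
  if counts.items = [] then GOAL_PATTERNS.getD "comprehensive" []
  else
    match PySem.List.max? GOAL_PATTERNS.keys (fun p => counts.getD p 0) with
    | some best => GOAL_PATTERNS.getD best []
    | none => []  -- unreachable: GOAL_PATTERNS.keys is nonempty

-- ===== PRECONDITION & SPEC =====
def Spec_match_goal_pattern_py (goal : String) (out : List String) : Prop := out = match_goal_pattern_py_alt goal
instance (goal : String) (out : List String) : Decidable (Spec_match_goal_pattern_py goal out) := by unfold Spec_match_goal_pattern_py; infer_instance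

-- ===== CLAIM (what is proved, stated in full; the proofs are below) =====
def Claim_equal_match_goal_pattern_py : Prop := ∀ (goal : String), Dom_match_goal_pattern_py goal → Spec_match_goal_pattern_py goal (match_goal_pattern_py goal)

-- ===== LEMMAS AND PROOFS =====

-- the six pattern names, in GOAL_PATTERNS order
def pats : List String := ["academic", "technical", "comprehensive", "fast", "cost_efficient", "multilingual"]

-- canonical key function on six abstract per-pattern scores
def fkey (n1 n2 n3 n4 n5 n6 : Int) (k : String) : Int :=
  if k = "academic" then n1
  else if k = "technical" then n2
  else if k = "comprehensive" then n3
  else if k = "fast" then n4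
  else if k = "cost_efficient" then n5
  else if k = "multilingual" then n6
  else 0

def Lfull (n1 n2 n3 n4 n5 n6 : Int) : List (String × Int) :=
  [("academic", n1), ("technical", n2), ("comprehensive", n3), ("fast", n4), ("cost_efficient", n5), ("multilingual", n6)]

-- per-pattern score of a keyword list: how many keywords lie among the pattern-name's words
def cnt (ks : List String) (ws : List String) : Int := (ks.countP (fun kw => ws.contains kw) : Int)

def AForm (n1 n2 n3 n4 n5 n6 : Int) : List String :=
  let Lp := (Lfull n1 n2 n3 n4 n5 n6).filter (fun q => q.2 > 0)
  if Lp = [] then GOAL_PATTERNS.getD "comprehensive" []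
  else
    match PySem.List.max? (Lp.map Prod.fst) (fkey n1 n2 n3 n4 n5 n6) with
    | some best => GOAL_PATTERNS.getD best []
    | none => []

def BForm (n1 n2 n3 n4 n5 n6 : Int) : List String :=
  if n1 = 0 ∧ n2 = 0 ∧ n3 = 0 ∧ n4 = 0 ∧ n5 = 0 ∧ n6 = 0 then GOAL_PATTERNS.getD "comprehensive" []
  else
    match PySem.List.max? pats (fkey n1 n2 n3 n4 n5 n6) with
    | some best => GOAL_PATTERNS.getD best []
    | none => []

-- ---- generic lemmas about the max?-foldl ----
theorem go_congr {α : Type} (f g : α → Int) (ks : List α) (acc : Option α)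
    (h : ∀ k ∈ ks, f k = g k) (hacc : ∀ m, acc = some m → f m = g m) :
    ks.foldl (fun acc x => match acc with | none => some x | some m => if f m < f x then some x else some m) acc
      = ks.foldl (fun acc x => match acc with | none => some x | some m => if g m < g x then some x else some m) acc := by
  induction ks generalizing acc with
  | nil => rfl
  | cons x t ih =>
    simp only [List.foldl_cons]
    have hx : f x = g x := h x (by simp)
    cases acc with
    | none => exact ih _ (fun k hk => h k (by simp [hk])) (by rintro m hm; cases hm; exact hx)
    | some m =>
      have hm : f m = g m := hacc m rfl
      dsimp only
      rw [show (if f m < f x then some x else some m) = (if g m < g x then some x else some m) by rw [hm, hx]]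
      refine ih _ (fun k hk => h k (by simp [hk])) ?_
      rintro m' hm'
      split at hm' <;> simp_all
theorem max?_congr {α : Type} (f g : α → Int) (ks : List α) (h : ∀ k ∈ ks, f k = g k) :
    PySem.List.max? ks f = PySem.List.max? ks g := by
  simpa [PySem.List.max?] using go_congr f g ks none h (by simp)
theorem go_skip {α : Type} (f : α → Int) (ks : List α) (h : ∀ k ∈ ks, 0 ≤ f k) (m : α) (hm : 0 ≤ f m) :
    ks.foldl (fun acc x => match acc with | none => some x | some m => if f m < f x then some x else some m) (some m)
      = (ks.filter (fun k => 0 < f k)).foldl (fun acc x => match acc with | none => some x | some m => if f m < f x then some x else some m) (some m) := by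
  induction ks generalizing m with
  | nil => rfl
  | cons x t ih =>
    have hx : 0 ≤ f x := h x (by simp)
    by_cases hp : 0 < f x
    · have hd : (decide (0 < f x)) = true := by simpa using hp
      simp only [List.foldl_cons, List.filter_cons, hd, if_true]
      split
      · exact ih (fun k hk => h k (by simp [hk])) x hx
      · exact ih (fun k hk => h k (by simp [hk])) m hm
    · have hd : (decide (0 < f x)) = false := by simpa using hp
      simp only [List.foldl_cons, List.filter_cons, hd, Bool.false_eq_true, if_false]
      rw [if_neg (by omega)]
      exact ih (fun k hk => h k (by simp [hk])) m hm
theorem go_zero {α : Type} (f : α → Int) (ks : List α) (h : ∀ k ∈ ks, 0 ≤ f k) (m : α) (hm : f m = 0)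
    (hex : ∃ k ∈ ks, 0 < f k) :
    ks.foldl (fun acc x => match acc with | none => some x | some m => if f m < f x then some x else some m) (some m)
      = (ks.filter (fun k => 0 < f k)).foldl (fun acc x => match acc with | none => some x | some m => if f m < f x then some x else some m) none := by
  induction ks generalizing m with
  | nil => simp at hex
  | cons x t ih =>
    have hx : 0 ≤ f x := h x (by simp)
    by_cases hp : 0 < f x
    · have hd : (decide (0 < f x)) = true := by simpa using hp
      simp only [List.foldl_cons, List.filter_cons, hd, if_true]
      rw [if_pos (by omega)]
      exact go_skip f t (fun k hk => h k (by simp [hk])) x hx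
    · have hd : (decide (0 < f x)) = false := by simpa using hp
      simp only [List.foldl_cons, List.filter_cons, hd, Bool.false_eq_true, if_false]
      rw [if_neg (by omega)]
      refine ih (fun k hk => h k (by simp [hk])) m hm ?_
      rcases hex with ⟨k, hk, hkp⟩
      rcases List.mem_cons.mp hk with rfl | hk'
      · omega
      · exact ⟨k, hk', hkp⟩
theorem max?_filter_pos {α : Type} (f : α → Int) (ks : List α) (h : ∀ k ∈ ks, 0 ≤ f k)
    (hex : ∃ k ∈ ks, 0 < f k) :
    PySem.List.max? ks f = PySem.List.max? (ks.filter (fun k => 0 < f k)) f := by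
  simp only [PySem.List.max?]
  cases ks with
  | nil => simp at hex
  | cons x t =>
    have hx : 0 ≤ f x := h x (by simp)
    by_cases hp : 0 < f x
    · have hd : (decide (0 < f x)) = true := by simpa using hp
      simp only [List.foldl_cons, List.filter_cons, hd, if_true]
      exact go_skip f t (fun k hk => h k (by simp [hk])) x hx
    · have hx0 : f x = 0 := le_antisymm (by omega) hx
      have hd : (decide (0 < f x)) = false := by simpa using hp
      simp only [List.foldl_cons, List.filter_cons, hd, Bool.false_eq_true, if_false]
      refine go_zero f t (fun k hk => h k (by simp [hk])) x hx0 ?_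
      rcases hex with ⟨k, hk, hkp⟩
      rcases List.mem_cons.mp hk with rfl | hk'
      · omega
      · exact ⟨k, hk', hkp⟩

theorem insert_fresh {ν : Type} (acc : List (String × ν)) (k : String) (v : ν)
    (h : ∀ q ∈ acc, q.1 ≠ k) :
    (PySem.Dict.mk acc).insert k v = PySem.Dict.mk (acc ++ [(k, v)]) := by
  unfold PySem.Dict.insert
  rw [if_neg]
  intro hc
  simp only [PySem.Dict.contains, List.any_eq_true] at hc
  obtain ⟨q, hq, hqe⟩ := hc
  exact h q hq (by simpa using hqe)

theorem foldl_insert_fresh (g : String → Int) (L : List (String × List String)) (acc : List (String × Int))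
    (hdisj : ∀ p ∈ L, ∀ q ∈ acc, p.1 ≠ q.1) (hL : (L.map Prod.fst).Nodup) :
    L.foldl (fun sc pt => if g pt.1 > 0 then sc.insert pt.1 (g pt.1) else sc) (PySem.Dict.mk acc)
      = PySem.Dict.mk (acc ++ (L.map (fun pt => (pt.1, g pt.1))).filter (fun q => q.2 > 0)) := by
  induction L generalizing acc with
  | nil => simp
  | cons p t ih =>
    simp only [List.foldl_cons, List.map_cons, List.filter_cons]
    by_cases hp : g p.1 > 0
    · have hd : (decide ((p.1, g p.1).2 > 0)) = true := by simpa using hp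
      rw [if_pos hp, insert_fresh acc p.1 (g p.1) (fun q hq => (hdisj p (by simp) q hq).symm)]
      rw [ih (acc ++ [(p.1, g p.1)]) ?_ ?_]
      · simp [hd]
      · intro p' hp' q hq
        rcases List.mem_append.mp hq with hq | hq
        · exact hdisj p' (by simp [hp']) q hq
        · simp at hq
          subst hq
          simp only [List.map_cons, List.nodup_cons] at hL
          intro hcontra
          exact hL.1 (hcontra ▸ (List.mem_map_of_mem hp'))
      · simp only [List.map_cons, List.nodup_cons] at hL
        exact hL.2
    · have hd : (decide ((p.1, g p.1).2 > 0)) = false := by simpa using hp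
      rw [if_neg hp, ih acc (fun p' hp' => hdisj p' (by simp [hp'])) ?_]
      · simp [hd]
      · simp only [List.map_cons, List.nodup_cons] at hL
        exact hL.2

theorem bcount (ks : List String) (d : PySem.Dict String Int) (p : String) :
    (ks.foldl bstep d).getD p 0 = d.getD p 0 + (ks.countP (fun kw => WORD_TO_PATTERN.get? kw == some p) : Int) := by
  induction ks generalizing d with
  | nil => simp
  | cons kw t ih =>
    simp only [List.foldl_cons, List.countP_cons]
    rw [ih]
    unfold bstep
    cases hg : WORD_TO_PATTERN.get? kw with
    | none => simp [hg]
    | some q =>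
      rw [PySem.Dict.getD_insert]
      by_cases hpq : p = q
      · subst hpq
        simp
        omega
      · have hqp : (q == p) = false := by simp [Ne.symm hpq]
        simp [hpq, hqp]

theorem insert_items_ne_nil {κ ν : Type} [BEq κ] (d : PySem.Dict κ ν) (k : κ) (v : ν) :
    (d.insert k v).items ≠ [] := by
  unfold PySem.Dict.insert
  split
  · intro hnil
    have h0 := List.map_eq_nil_iff.mp hnil
    rename_i hc
    rw [PySem.Dict.contains, h0] at hc
    simp at hc
  · intro hnil
    simp at hnil

theorem bempty (ks : List String) (d : PySem.Dict String Int) :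
    (ks.foldl bstep d).items = [] ↔ d.items = [] ∧ ∀ kw ∈ ks, WORD_TO_PATTERN.get? kw = none := by
  induction ks generalizing d with
  | nil => simp
  | cons kw t ih =>
    simp only [List.foldl_cons]
    rw [ih]
    cases hg : WORD_TO_PATTERN.get? kw with
    | none =>
      have hb : bstep d kw = d := by unfold bstep; rw [hg]
      rw [hb]
      constructor
      · rintro ⟨h1, h2⟩
        exact ⟨h1, by intro k hk; rcases List.mem_cons.mp hk with rfl | hk'; exact hg; exact h2 k hk'⟩
      · rintro ⟨h1, h2⟩
        exact ⟨h1, fun k hk => h2 k (by simp [hk])⟩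
    | some q =>
      have hb : bstep d kw = d.insert q (d.getD q 0 + 1) := by unfold bstep; rw [hg]
      rw [hb]
      constructor
      · rintro ⟨h1, -⟩
        exact absurd h1 (insert_items_ne_nil d q _)
      · rintro ⟨-, h2⟩
        have := h2 kw (by simp)
        rw [hg] at this
        exact absurd this (by simp)

theorem wtp_get (kw : String) :
    WORD_TO_PATTERN.get? kw =
      (if "academic" = kw then some "academic"
       else if "technical" = kw then some "technical"
       else if "comprehensive" = kw then some "comprehensive"
       else if "fast" = kw then some "fast"
       else if "cost" = kw then some "cost_efficient"
       else if "efficient" = kw then some "cost_efficient"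
       else if "multilingual" = kw then some "multilingual"
       else none) := by
  have hW : WORD_TO_PATTERN = PySem.Dict.mk
      [("academic","academic"),("technical","technical"),("comprehensive","comprehensive"),
       ("fast","fast"),("cost","cost_efficient"),("efficient","cost_efficient"),
       ("multilingual","multilingual")] := by decide
  rw [hW]
  simp only [PySem.Dict.get?, PySem.Dict.items]
  by_cases h1 : "academic" = kw
  · rw [List.find?_cons_of_pos (p := fun q : String × String => q.1 == kw) (by simp [h1]), if_pos h1]; rfl
  rw [List.find?_cons_of_neg (p := fun q : String × String => q.1 == kw) (by simp [h1]), if_neg h1]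
  by_cases h2 : "technical" = kw
  · rw [List.find?_cons_of_pos (p := fun q : String × String => q.1 == kw) (by simp [h2]), if_pos h2]; rfl
  rw [List.find?_cons_of_neg (p := fun q : String × String => q.1 == kw) (by simp [h2]), if_neg h2]
  by_cases h3 : "comprehensive" = kw
  · rw [List.find?_cons_of_pos (p := fun q : String × String => q.1 == kw) (by simp [h3]), if_pos h3]; rfl
  rw [List.find?_cons_of_neg (p := fun q : String × String => q.1 == kw) (by simp [h3]), if_neg h3]
  by_cases h4 : "fast" = kw
  · rw [List.find?_cons_of_pos (p := fun q : String × String => q.1 == kw) (by simp [h4]), if_pos h4]; rfl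
  rw [List.find?_cons_of_neg (p := fun q : String × String => q.1 == kw) (by simp [h4]), if_neg h4]
  by_cases h5 : "cost" = kw
  · rw [List.find?_cons_of_pos (p := fun q : String × String => q.1 == kw) (by simp [h5]), if_pos h5]; rfl
  rw [List.find?_cons_of_neg (p := fun q : String × String => q.1 == kw) (by simp [h5]), if_neg h5]
  by_cases h6 : "efficient" = kw
  · rw [List.find?_cons_of_pos (p := fun q : String × String => q.1 == kw) (by simp [h6]), if_pos h6]; rfl
  rw [List.find?_cons_of_neg (p := fun q : String × String => q.1 == kw) (by simp [h6]), if_neg h6]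
  by_cases h7 : "multilingual" = kw
  · rw [List.find?_cons_of_pos (p := fun q : String × String => q.1 == kw) (by simp [h7]), if_pos h7]; rfl
  rw [List.find?_cons_of_neg (p := fun q : String × String => q.1 == kw) (by simp [h7]), if_neg h7]
  rfl

theorem none_iff (kw : String) : (WORD_TO_PATTERN.get? kw = none) ↔
    (¬ (["academic"] : List String).contains kw = true
     ∧ ¬ (["technical"] : List String).contains kw = true
     ∧ ¬ (["comprehensive"] : List String).contains kw = true
     ∧ ¬ (["fast"] : List String).contains kw = true
     ∧ ¬ (["cost", "efficient"] : List String).contains kw = true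
     ∧ ¬ (["multilingual"] : List String).contains kw = true) := by
  rw [wtp_get]
  split_ifs <;> subst_vars <;> simp_all [eq_comm]

theorem predeq1 (kw : String) :
    (WORD_TO_PATTERN.get? kw == some "academic") = (["academic"] : List String).contains kw := by
  rw [wtp_get]
  split_ifs <;> subst_vars <;> simp_all [eq_comm]

theorem predeq5 (kw : String) :
    (WORD_TO_PATTERN.get? kw == some "cost_efficient") = (["cost", "efficient"] : List String).contains kw := by
  rw [wtp_get]
  split_ifs <;> subst_vars <;> simp_all [eq_comm]
theorem predeq2 (kw : String) :
    (WORD_TO_PATTERN.get? kw == some "technical") = (["technical"] : List String).contains kw := by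
  rw [wtp_get]; split_ifs <;> subst_vars <;> simp_all [eq_comm]
theorem predeq3 (kw : String) :
    (WORD_TO_PATTERN.get? kw == some "comprehensive") = (["comprehensive"] : List String).contains kw := by
  rw [wtp_get]; split_ifs <;> subst_vars <;> simp_all [eq_comm]
theorem predeq4 (kw : String) :
    (WORD_TO_PATTERN.get? kw == some "fast") = (["fast"] : List String).contains kw := by
  rw [wtp_get]; split_ifs <;> subst_vars <;> simp_all [eq_comm]
theorem predeq6 (kw : String) :
    (WORD_TO_PATTERN.get? kw == some "multilingual") = (["multilingual"] : List String).contains kw := by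
  rw [wtp_get]; split_ifs <;> subst_vars <;> simp_all [eq_comm]

theorem A_shape (c1 c2 c3 c4 c5 c6 : Int) :
    (if (PySem.Dict.mk ((Lfull c1 c2 c3 c4 c5 c6).filter (fun q => q.2 > 0))).items = []
     then GOAL_PATTERNS.getD "comprehensive" []
     else
       match PySem.List.max? (PySem.Dict.mk ((Lfull c1 c2 c3 c4 c5 c6).filter (fun q => q.2 > 0))).keys (fun x => (PySem.Dict.mk ((Lfull c1 c2 c3 c4 c5 c6).filter (fun q => q.2 > 0))).getD x 0) with
       | some best => GOAL_PATTERNS.getD best []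
       | none => [])
    = AForm c1 c2 c3 c4 c5 c6 := by
  have hpt : ∀ x ∈ ((Lfull c1 c2 c3 c4 c5 c6).filter (fun q => q.2 > 0)).map Prod.fst, (PySem.Dict.mk ((Lfull c1 c2 c3 c4 c5 c6).filter (fun q => q.2 > 0))).getD x 0 = fkey c1 c2 c3 c4 c5 c6 x := by
    intro x hx
    obtain ⟨q, hq, rfl⟩ := List.mem_map.mp hx
    have hnd : (PySem.Dict.mk ((Lfull c1 c2 c3 c4 c5 c6).filter (fun q => q.2 > 0))).keys.Nodup := by
      have hsub : (((Lfull c1 c2 c3 c4 c5 c6).filter (fun q => q.2 > 0)).map (fun p => p.1)).Sublist ((Lfull c1 c2 c3 c4 c5 c6).map (fun p => p.1)) :=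
        (List.filter_sublist).map _
      refine List.Nodup.sublist hsub ?_
      show (["academic", "technical", "comprehensive", "fast", "cost_efficient", "multilingual"] : List String).Nodup
      decide
    have hv : (PySem.Dict.mk ((Lfull c1 c2 c3 c4 c5 c6).filter (fun q => q.2 > 0))).getD q.1 0 = q.2 :=
      PySem.Dict.getD_of_mem_items _ (by simpa using hq) hnd 0
    rw [hv]
    have hqL : q ∈ Lfull c1 c2 c3 c4 c5 c6 := List.mem_of_mem_filter hq
    simp only [Lfull, List.mem_cons, List.not_mem_nil, or_false] at hqL
    rcases hqL with rfl | rfl | rfl | rfl | rfl | rfl <;> simp [fkey]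
  have hkeys : (PySem.Dict.mk ((Lfull c1 c2 c3 c4 c5 c6).filter (fun q => q.2 > 0))).keys = ((Lfull c1 c2 c3 c4 c5 c6).filter (fun q => q.2 > 0)).map Prod.fst := rfl
  rw [hkeys, max?_congr (fun x => (PySem.Dict.mk ((Lfull c1 c2 c3 c4 c5 c6).filter (fun q => q.2 > 0))).getD x 0) (fkey c1 c2 c3 c4 c5 c6) (((Lfull c1 c2 c3 c4 c5 c6).filter (fun q => q.2 > 0)).map Prod.fst) hpt]
  rfl

theorem A_norm (ks : List String) :
    (if (GOAL_PATTERNS.items.foldl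
          (fun sc pt =>
            let pattern_keywords := (PySem.Str.split? pt.1 "_").getD []
            let score : Int := ks.foldl (fun s kw => if pattern_keywords.contains kw then s + 1 else s) 0
            if score > 0 then sc.insert pt.1 score else sc)
          PySem.Dict.empty).items = []
     then GOAL_PATTERNS.getD "comprehensive" []
     else
       match PySem.List.max?
           (GOAL_PATTERNS.items.foldl
             (fun sc pt =>
               let pattern_keywords := (PySem.Str.split? pt.1 "_").getD []
               let score : Int := ks.foldl (fun s kw => if pattern_keywords.contains kw then s + 1 else s) 0
               if score > 0 then sc.insert pt.1 score else sc)
             PySem.Dict.empty).keys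
           (fun x => (GOAL_PATTERNS.items.foldl
             (fun sc pt =>
               let pattern_keywords := (PySem.Str.split? pt.1 "_").getD []
               let score : Int := ks.foldl (fun s kw => if pattern_keywords.contains kw then s + 1 else s) 0
               if score > 0 then sc.insert pt.1 score else sc)
             PySem.Dict.empty).getD x 0) with
       | some best => GOAL_PATTERNS.getD best []
       | none => [])
    = AForm (cnt ks ["academic"]) (cnt ks ["technical"]) (cnt ks ["comprehensive"]) (cnt ks ["fast"]) (cnt ks ["cost", "efficient"]) (cnt ks ["multilingual"]) := by
  have hfold : GOAL_PATTERNS.items.foldl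
          (fun sc pt =>
            let pattern_keywords := (PySem.Str.split? pt.1 "_").getD []
            let score : Int := ks.foldl (fun s kw => if pattern_keywords.contains kw then s + 1 else s) 0
            if score > 0 then sc.insert pt.1 score else sc)
          PySem.Dict.empty
      = PySem.Dict.mk ((Lfull (cnt ks ["academic"]) (cnt ks ["technical"]) (cnt ks ["comprehensive"]) (cnt ks ["fast"]) (cnt ks ["cost", "efficient"]) (cnt ks ["multilingual"])).filter (fun q => q.2 > 0)) := by
    have h0 := foldl_insert_fresh
      (fun name => ks.foldl (fun s kw => if ((PySem.Str.split? name "_").getD []).contains kw then s + 1 else s) 0)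
      GOAL_PATTERNS.items [] (by simp) (by decide)
    have hmapL : GOAL_PATTERNS.items.map
        (fun pt => (pt.1, ks.foldl (fun s kw => if ((PySem.Str.split? pt.1 "_").getD []).contains kw then s + 1 else s) 0))
        = Lfull (cnt ks ["academic"]) (cnt ks ["technical"]) (cnt ks ["comprehensive"]) (cnt ks ["fast"]) (cnt ks ["cost", "efficient"]) (cnt ks ["multilingual"]) := by
      rw [show GOAL_PATTERNS.items =
        [ ("academic", ["research_search", "research_deep", "research_markdown", "research_llm_extract"])
        , ("technical", ["research_github", "research_search", "research_fetch", "research_llm_classify"])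
        , ("comprehensive", ["research_deep", "research_spider", "research_markdown", "research_llm_summarize"])
        , ("fast", ["research_search", "research_llm_classify"])
        , ("cost_efficient", ["research_search", "research_fetch", "research_llm_classify"])
        , ("multilingual", ["research_search", "research_fetch", "research_markdown", "research_llm_translate"]) ] from rfl]
      simp only [List.map_cons, List.map_nil, Lfull]
      rw [show (PySem.Str.split? "academic" "_").getD [] = ["academic"] from by decide,
          show (PySem.Str.split? "technical" "_").getD [] = ["technical"] from by decide,
          show (PySem.Str.split? "comprehensive" "_").getD [] = ["comprehensive"] from by decide,
          show (PySem.Str.split? "fast" "_").getD [] = ["fast"] from by decide,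
          show (PySem.Str.split? "cost_efficient" "_").getD [] = ["cost", "efficient"] from by decide,
          show (PySem.Str.split? "multilingual" "_").getD [] = ["multilingual"] from by decide]
      simp only [PySem.List.foldl_count_if, cnt, Int.zero_add]
    rw [hmapL] at h0
    simpa using h0
  rw [hfold]
  exact A_shape (cnt ks ["academic"]) (cnt ks ["technical"]) (cnt ks ["comprehensive"]) (cnt ks ["fast"]) (cnt ks ["cost", "efficient"]) (cnt ks ["multilingual"])

theorem B_norm (ks : List String) :
    (if (ks.foldl bstep PySem.Dict.empty).items = [] then GOAL_PATTERNS.getD "comprehensive" []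
     else match PySem.List.max? GOAL_PATTERNS.keys (fun p => (ks.foldl bstep PySem.Dict.empty).getD p 0) with
          | some best => GOAL_PATTERNS.getD best []
          | none => [])
    = BForm (cnt ks ["academic"]) (cnt ks ["technical"]) (cnt ks ["comprehensive"]) (cnt ks ["fast"]) (cnt ks ["cost", "efficient"]) (cnt ks ["multilingual"]) := by
  have hkeys : GOAL_PATTERNS.keys = pats := by decide
  have hcnt : ∀ (p : String) (ws : List String), (∀ kw, (WORD_TO_PATTERN.get? kw == some p) = (ws.contains kw)) →
      (ks.foldl bstep PySem.Dict.empty).getD p 0 = cnt ks ws := by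
    intro p ws hpred
    rw [bcount, List.countP_congr (fun kw _ => by rw [hpred kw])]
    have hc : List.countP (fun kw => ws.contains kw) ks = List.countP (fun kw => decide (kw ∈ ws)) ks :=
      List.countP_congr (fun kw _ => by simp)
    simp [cnt, hc]
  have e1 := hcnt "academic" ["academic"] predeq1
  have e2 := hcnt "technical" ["technical"] predeq2
  have e3 := hcnt "comprehensive" ["comprehensive"] predeq3
  have e4 := hcnt "fast" ["fast"] predeq4
  have e5 := hcnt "cost_efficient" ["cost", "efficient"] predeq5
  have e6 := hcnt "multilingual" ["multilingual"] predeq6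
  have hiff : (ks.foldl bstep PySem.Dict.empty).items = [] ↔
      (cnt ks ["academic"] = 0 ∧ cnt ks ["technical"] = 0 ∧ cnt ks ["comprehensive"] = 0
       ∧ cnt ks ["fast"] = 0 ∧ cnt ks ["cost", "efficient"] = 0 ∧ cnt ks ["multilingual"] = 0) := by
    rw [bempty]
    simp only [cnt, Int.natCast_eq_zero, List.countP_eq_zero]
    constructor
    · rintro ⟨-, h⟩
      refine ⟨fun kw hkw => ((none_iff kw).mp (h kw hkw)).1,
              fun kw hkw => ((none_iff kw).mp (h kw hkw)).2.1,
              fun kw hkw => ((none_iff kw).mp (h kw hkw)).2.2.1,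
              fun kw hkw => ((none_iff kw).mp (h kw hkw)).2.2.2.1,
              fun kw hkw => ((none_iff kw).mp (h kw hkw)).2.2.2.2.1,
              fun kw hkw => ((none_iff kw).mp (h kw hkw)).2.2.2.2.2⟩
    · rintro ⟨z1, z2, z3, z4, z5, z6⟩
      exact ⟨rfl, fun kw hkw => (none_iff kw).mpr ⟨z1 kw hkw, z2 kw hkw, z3 kw hkw, z4 kw hkw, z5 kw hkw, z6 kw hkw⟩⟩
  by_cases hz : (cnt ks ["academic"] = 0 ∧ cnt ks ["technical"] = 0 ∧ cnt ks ["comprehensive"] = 0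
       ∧ cnt ks ["fast"] = 0 ∧ cnt ks ["cost", "efficient"] = 0 ∧ cnt ks ["multilingual"] = 0)
  · rw [if_pos (hiff.mpr hz)]
    unfold BForm
    rw [if_pos hz]
  · rw [if_neg (fun h => hz (hiff.mp h))]
    unfold BForm
    rw [if_neg hz]
    have hmax : PySem.List.max? GOAL_PATTERNS.keys (fun p => (ks.foldl bstep PySem.Dict.empty).getD p 0)
        = PySem.List.max? pats (fkey (cnt ks ["academic"]) (cnt ks ["technical"]) (cnt ks ["comprehensive"]) (cnt ks ["fast"]) (cnt ks ["cost", "efficient"]) (cnt ks ["multilingual"])) := by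
      rw [hkeys]
      apply max?_congr
      intro k hk
      simp only [pats, List.mem_cons, List.not_mem_nil, or_false] at hk
      rcases hk with rfl | rfl | rfl | rfl | rfl | rfl
      · rw [e1]; simp [fkey]
      · rw [e2]; simp [fkey]
      · rw [e3]; simp [fkey]
      · rw [e4]; simp [fkey]
      · rw [e5]; simp [fkey]
      · rw [e6]; simp [fkey]
    rw [hmax]

theorem form_eq (n1 n2 n3 n4 n5 n6 : Int) (h1 : 0 ≤ n1) (h2 : 0 ≤ n2) (h3 : 0 ≤ n3)
    (h4 : 0 ≤ n4) (h5 : 0 ≤ n5) (h6 : 0 ≤ n6) :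
    AForm n1 n2 n3 n4 n5 n6 = BForm n1 n2 n3 n4 n5 n6 := by
  by_cases hz : n1 = 0 ∧ n2 = 0 ∧ n3 = 0 ∧ n4 = 0 ∧ n5 = 0 ∧ n6 = 0
  · obtain ⟨e1, e2, e3, e4, e5, e6⟩ := hz
    subst e1; subst e2; subst e3; subst e4; subst e5; subst e6
    decide
  · have hfk : ∀ k ∈ pats, 0 ≤ fkey n1 n2 n3 n4 n5 n6 k := by
      intro k hk
      simp only [pats, List.mem_cons, List.not_mem_nil, or_false] at hk
      rcases hk with rfl | rfl | rfl | rfl | rfl | rfl <;> simp [fkey] <;> omega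
    have hex : ∃ k ∈ pats, 0 < fkey n1 n2 n3 n4 n5 n6 k := by
      by_contra hc
      push_neg at hc
      have c1 := hc "academic" (by simp [pats])
      have c2 := hc "technical" (by simp [pats])
      have c3 := hc "comprehensive" (by simp [pats])
      have c4 := hc "fast" (by simp [pats])
      have c5 := hc "cost_efficient" (by simp [pats])
      have c6 := hc "multilingual" (by simp [pats])
      simp [fkey] at c1 c2 c3 c4 c5 c6
      exact hz ⟨by omega, by omega, by omega, by omega, by omega, by omega⟩
    have hLp : ((Lfull n1 n2 n3 n4 n5 n6).filter (fun q => q.2 > 0)) ≠ [] := by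
      intro hnil
      rw [List.filter_eq_nil_iff] at hnil
      simp only [Lfull, List.mem_cons, List.not_mem_nil, or_false] at hnil
      apply hz
      refine ⟨?_, ?_, ?_, ?_, ?_, ?_⟩
      · have := hnil ("academic", n1) (by simp); simp at this; omega
      · have := hnil ("technical", n2) (by simp [Lfull]); simp at this; omega
      · have := hnil ("comprehensive", n3) (by simp [Lfull]); simp at this; omega
      · have := hnil ("fast", n4) (by simp [Lfull]); simp at this; omega
      · have := hnil ("cost_efficient", n5) (by simp [Lfull]); simp at this; omega
      · have := hnil ("multilingual", n6) (by simp [Lfull]); simp at this; omega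
    have hmap : ((Lfull n1 n2 n3 n4 n5 n6).filter (fun q => q.2 > 0)).map Prod.fst
        = pats.filter (fun k => 0 < fkey n1 n2 n3 n4 n5 n6 k) := by
      have hpt : ∀ q ∈ Lfull n1 n2 n3 n4 n5 n6,
          (decide (q.2 > 0)) = ((fun k => decide (0 < fkey n1 n2 n3 n4 n5 n6 k)) ∘ Prod.fst) q := by
        intro q hq
        simp only [Lfull, List.mem_cons, List.not_mem_nil, or_false] at hq
        rcases hq with rfl | rfl | rfl | rfl | rfl | rfl <;> simp [fkey]
      rw [show pats = (Lfull n1 n2 n3 n4 n5 n6).map Prod.fst from rfl, List.filter_map]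
      rw [List.filter_congr hpt]
    unfold AForm BForm
    rw [if_neg hLp, if_neg hz, max?_filter_pos (fkey n1 n2 n3 n4 n5 n6) pats hfk hex, ← hmap]

-- ===== VERDICT (by name: the statement is the Claim_ definition above) =====
set_option maxHeartbeats 2000000 in
theorem match_goal_pattern_py_spec : Claim_equal_match_goal_pattern_py := by
  intro goal _
  show match_goal_pattern_py goal = match_goal_pattern_py_alt goal
  have hA : match_goal_pattern_py goal = AForm (cnt (extract_goal_keywords goal) ["academic"]) (cnt (extract_goal_keywords goal) ["technical"]) (cnt (extract_goal_keywords goal) ["comprehensive"]) (cnt (extract_goal_keywords goal) ["fast"]) (cnt (extract_goal_keywords goal) ["cost", "efficient"]) (cnt (extract_goal_keywords goal) ["multilingual"]) :=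
    A_norm (extract_goal_keywords goal)
  have hB : match_goal_pattern_py_alt goal = BForm (cnt (extract_goal_keywords goal) ["academic"]) (cnt (extract_goal_keywords goal) ["technical"]) (cnt (extract_goal_keywords goal) ["comprehensive"]) (cnt (extract_goal_keywords goal) ["fast"]) (cnt (extract_goal_keywords goal) ["cost", "efficient"]) (cnt (extract_goal_keywords goal) ["multilingual"]) :=
    B_norm (extract_goal_keywords goal)
  rw [hA, hB]
  exact form_eq _ _ _ _ _ _ (Int.natCast_nonneg _) (Int.natCast_nonneg _) (Int.natCast_nonneg _) (Int.natCast_nonneg _) (Int.natCast_nonneg _) (Int.natCast_nonneg _)
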